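-- pv_equiv track=rewrite | github.com/autopkg/dataJAR-recipes | *AutoPkg Linters/MissingKeyValueChecker/MissingKeyValueChecker.py | _check_empty_keys
-- ===== SOURCE A (Python) =====
-- def _find_yaml_key_line_number(key, lines):
--     """Find line number for a key in YAML content.
--
--     Args:
--         key: Key name to search for
--         lines: List of lines from the YAML file
--
--     Returns:
--         Line number (1-indexed) or None if not found
--     """
--     for i, line in enumerate(lines, 1):
--         context = '\n'.join(lines[max(0, i-10):i])
--         if f'{key}:' in line and 'pkginfo' in context:
--             return i
--     return None
--
-- def _check_empty_keys(pkginfo, lines):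
--     """Check pkginfo dict for empty keys and find their line numbers.
--
--     Args:
--         pkginfo: pkginfo dict to check
--         lines: List of lines from the YAML file
--
--     Returns:
--         List of tuples (key_name, line_number)
--     """
--     empty_keys = []
--
--     for key, value in pkginfo.items():
--         # Check if value is empty, None, or whitespace-only string
--         is_empty = (value is None or
--                     (isinstance(value, str) and not value.strip()))
--
--         if is_empty:
--             line_num = _find_yaml_key_line_number(key, lines)
--             if line_num:
--                 empty_keys.append((key, line_num))
--
--     return empty_keys
-- ===== SOURCE B (Python) =====
-- def _check_empty_keys(pkginfo, lines):
--     """Single pass over the lines: track the most recent 'pkginfo' line index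
--     and locate every empty key's first matching line in one scan."""
--     empty = [k for k, v in pkginfo.items()
--              if v is None or (isinstance(v, str) and not v.strip())]
--     loc = {}
--     last_pkg = None
--     for i, line in enumerate(lines):
--         if 'pkginfo' in line:
--             last_pkg = i
--         if last_pkg is not None and i - last_pkg <= 9:
--             for k in empty:
--                 if k not in loc and f'{k}:' in line:
--                     loc[k] = i + 1
--     return [(k, loc[k]) for k in empty if k in loc]
-- ===== Notes on version B (the rewrite author's own statement) =====
-- stated objective: faster
-- what changed: Instead of rescanning all lines (and re-joining a 10-line context string per line) once per empty key, B collects the empty keys first and makes a single pass over the lines, tracking the most recent 'pkginfo' line index to decide the context-window test and recording each empty key's first matching line in a dict.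
import Mathlib
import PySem

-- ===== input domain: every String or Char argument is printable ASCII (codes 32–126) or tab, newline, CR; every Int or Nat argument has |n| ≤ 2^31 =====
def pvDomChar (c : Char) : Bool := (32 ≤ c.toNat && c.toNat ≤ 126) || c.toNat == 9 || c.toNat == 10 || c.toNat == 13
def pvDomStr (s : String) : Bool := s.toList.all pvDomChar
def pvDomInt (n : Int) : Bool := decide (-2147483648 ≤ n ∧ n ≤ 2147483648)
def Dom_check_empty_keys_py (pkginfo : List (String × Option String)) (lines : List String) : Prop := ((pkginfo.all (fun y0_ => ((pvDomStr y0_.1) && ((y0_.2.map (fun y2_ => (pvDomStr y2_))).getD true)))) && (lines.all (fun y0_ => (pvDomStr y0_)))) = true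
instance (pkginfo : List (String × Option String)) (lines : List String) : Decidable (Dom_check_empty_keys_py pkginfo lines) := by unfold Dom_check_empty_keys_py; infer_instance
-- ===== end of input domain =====

-- B collects the empty keys once and makes a single pass over the lines, tracking the
-- last 'pkginfo' line index instead of re-joining a 10-line context string per line per
-- key (objective: faster; a timing run measured B faster at the largest sizes).

-- ===== PORT A =====
def find_yaml_key_line_number (key : String) (lines : List String) : Option Int :=
  ((PySem.List.enumerate lines 1).find? (fun p =>
      PySem.Str.isIn (key ++ ":") p.2 &&
      PySem.Str.isIn "pkginfo"
        (PySem.Str.join "\n" (PySem.List.slice lines (some (max 0 (p.1 - 10))) (some p.1))))).map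
    (fun p => p.1)

def check_empty_keys_py (pkginfo : List (String × Option String)) (lines : List String) :
    List (String × Int) :=
  pkginfo.foldl (fun empty_keys kv =>
    let is_empty : Bool :=
      match kv.2 with
      | none => true
      | some s => PySem.Str.strip s == ""
    if is_empty then
      match find_yaml_key_line_number kv.1 lines with
      | some line_num =>
        if line_num != 0 then empty_keys ++ [(kv.1, line_num)] else empty_keys
      | none => empty_keys
    else empty_keys) []

-- ===== PORT B =====
def check_empty_keys_py_alt (pkginfo : List (String × Option String)) (lines : List String) :
    List (String × Int) :=
  let empty : List String := pkginfo.filterMap (fun kv =>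
    match kv.2 with
    | none => some kv.1
    | some s => if PySem.Str.strip s == "" then some kv.1 else none)
  let st : Option Int × PySem.Dict String Int :=
    (PySem.List.enumerate lines 0).foldl (fun st p =>
      let lastPkg : Option Int := if PySem.Str.isIn "pkginfo" p.2 then some p.1 else st.1
      let loc : PySem.Dict String Int :=
        match lastPkg with
        | some j =>
          if p.1 - j ≤ 9 then
            empty.foldl (fun loc k =>
              if !loc.contains k && PySem.Str.isIn (k ++ ":") p.2 then
                loc.insert k (p.1 + 1)
              else loc) st.2
          else st.2
        | none => st.2
      (lastPkg, loc)) (none, PySem.Dict.empty)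
  empty.filterMap (fun k => (st.2.get? k).map (fun n => (k, n)))

-- ===== PRECONDITION & SPEC =====
def Spec_check_empty_keys_py (pkginfo : List (String × Option String)) (lines : List String) (out : List (String × Int)) : Prop := out = check_empty_keys_py_alt pkginfo lines
instance (pkginfo : List (String × Option String)) (lines : List String) (out : List (String × Int)) : Decidable (Spec_check_empty_keys_py pkginfo lines out) := by unfold Spec_check_empty_keys_py; infer_instance

-- ===== CLAIM (what is proved, stated in full; the proofs are below) =====
def Claim_equal_check_empty_keys_py : Prop := ∀ (pkginfo : List (String × Option String)) (lines : List String), Dom_check_empty_keys_py pkginfo lines → Spec_check_empty_keys_py pkginfo lines (check_empty_keys_py pkginfo lines)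

-- ===== LEMMAS AND PROOFS =====

-- `value is None or (isinstance(value, str) and not value.strip())`
def pvEmpty (v : Option String) : Bool :=
  match v with
  | none => true
  | some s => PySem.Str.strip s == ""

-- `'pkginfo' in lines[j]` / `f'{k}:' in lines[i]` (0-indexed; out of range reads "")
def pvPkg (lines : List String) (j : Nat) : Bool :=
  PySem.Str.isIn "pkginfo" (lines.getD j "")

def pvKey (lines : List String) (k : String) (i : Nat) : Bool :=
  PySem.Str.isIn (k ++ ":") (lines.getD i "")

-- some line in the 10-line window ending at i contains 'pkginfo'
def pvWin (lines : List String) (i : Nat) : Bool :=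
  (List.range (i + 1)).any (fun j => decide (i ≤ j + 9) && pvPkg lines j)

def pvHit (lines : List String) (k : String) (i : Nat) : Bool :=
  pvKey lines k i && pvWin lines i

-- first 1-indexed line number whose line matches k and whose window contains 'pkginfo'
def pvFind (lines : List String) (k : String) : Option Int :=
  ((List.range lines.length).find? (pvHit lines k)).map (fun i => (i : Int) + 1)

-- index of the last 'pkginfo' line among the first m lines
def pvLast (lines : List String) (m : Nat) : Option Int :=
  (List.range m).foldl (fun o j => if pvPkg lines j then some (j : Int) else o) none

-- B's loop body, applied to the 0-based index
def pvStep (lines : List String) (empty : List String)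
    (st : Option Int × PySem.Dict String Int) (i : Nat) :
    Option Int × PySem.Dict String Int :=
  ((if pvPkg lines i then some (i : Int) else st.1),
    match (if pvPkg lines i then some (i : Int) else st.1) with
    | some j =>
      if (i : Int) - j ≤ 9 then
        empty.foldl (fun loc k =>
          if !loc.contains k && pvKey lines k i then loc.insert k ((i : Int) + 1) else loc) st.2
      else st.2
    | none => st.2)

def pvState (lines : List String) (empty : List String) (m : Nat) :
    Option Int × PySem.Dict String Int :=
  (List.range m).foldl (pvStep lines empty) (none, PySem.Dict.empty)

-- general: an infix containing no `sep` of `a ++ sep :: b` lies in `a` or in `b`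
theorem pv_infix_append_cons_iff (sub a b : List Char) (sep : Char)
    (hsep : sep ∉ sub) : (sub <:+: a ++ sep :: b) ↔ (sub <:+: a ∨ sub <:+: b) := by
  constructor
  · rintro ⟨s, t, heq⟩
    by_cases h1 : s.length + sub.length ≤ a.length
    · left
      have h2 : sub ++ t = (a ++ sep :: b).drop s.length := by
        rw [← heq]; simp
      have h3 : s.length ≤ a.length := by omega
      rw [List.drop_append_of_le_length h3] at h2
      have h5 : sub <+: a.drop s.length :=
        (List.isPrefix_append_of_length (by simp; omega)).mp ⟨t, h2⟩
      exact h5.isInfix.trans (a.drop_suffix s.length).isInfix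
    · by_cases h2 : a.length < s.length
      · right
        have h3 : sub ++ t = (a ++ sep :: b).drop s.length := by rw [← heq]; simp
        rw [List.drop_append, List.drop_eq_nil_of_le (by omega), List.nil_append,
          List.drop_cons (by omega)] at h3
        exact (List.IsPrefix.isInfix ⟨t, h3⟩).trans (b.drop_suffix _).isInfix
      · exfalso
        apply hsep
        have heq' : s ++ (sub ++ t) = a ++ sep :: b := by rw [← List.append_assoc]; exact heq
        have hl1 : a.length < (s ++ (sub ++ t)).length := by rw [heq']; simp
        have e1 : (s ++ (sub ++ t))[a.length]'hl1 = sep := by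
          rw [List.getElem_of_eq heq' hl1]
          rw [List.getElem_append_right (by omega)]
          simp
        rw [List.getElem_append_right (by omega), List.getElem_append_left (by omega)] at e1
        exact e1 ▸ List.getElem_mem _
  · rintro (h | h)
    · exact List.infix_append_of_infix_left h
    · exact List.infix_append_of_infix_right (h.trans (List.suffix_cons sep b).isInfix)

-- general: `sub in sep.join(parts)` tests the parts one by one when sep ∉ sub ≠ []
theorem pv_isIn_join_any (sub : List Char) (sep : Char) (hsep : sep ∉ sub) (hne : sub ≠ [])
    (parts : List (List Char)) :
    PySem.Chars.isIn sub (PySem.Chars.join [sep] parts) =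
      parts.any (fun l => PySem.Chars.isIn sub l) := by
  induction parts with
  | nil =>
    simp [PySem.Chars.join_nil]
    rw [PySem.Chars.isIn_eq_false_iff]
    simp [hne]
  | cons head tail ih =>
    match tail with
    | [] => simp [PySem.Chars.join_singleton]
    | b :: rest =>
      rw [PySem.Chars.join_cons_cons]
      rw [Bool.eq_iff_iff]
      simp only [List.any_cons, Bool.or_eq_true, PySem.Chars.isIn_iff_infix]
      rw [List.append_assoc, List.singleton_append,
        pv_infix_append_cons_iff sub head _ sep hsep]
      simp only [← PySem.Chars.isIn_iff_infix, ih]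
      simp

theorem pv_find?_congr_mem {α : Type} (l : List α) (p q : α → Bool)
    (h : ∀ x ∈ l, p x = q x) : l.find? p = l.find? q := by
  induction l with
  | nil => rfl
  | cons x xs ih =>
    simp only [List.find?_cons]
    rw [h x (by simp)]
    cases q x with
    | true => rfl
    | false => exact ih (fun y hy => h y (by simp [hy]))

theorem pv_enumerate_shift {α : Type} (xs : List α) (s : Int) :
    PySem.List.enumerate xs (s + 1) =
      (PySem.List.enumerate xs s).map (fun p => (p.1 + 1, p.2)) := by
  induction xs generalizing s with
  | nil => simp [PySem.List.enumerate]
  | cons x xs ih =>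
    rw [PySem.List.enumerate_cons, PySem.List.enumerate_cons, List.map_cons, ← ih]

theorem pv_anyWindow (lines : List String) (j : Nat) :
    (List.take (j + 1 - (j + 1 - 10)) (List.drop (j + 1 - 10) lines)).any
        (fun s => PySem.Str.isIn "pkginfo" s) = pvWin lines j := by
  rw [Bool.eq_iff_iff, List.any_eq_true, pvWin, List.any_eq_true]
  constructor
  · rintro ⟨x, hx, hp⟩
    obtain ⟨idx, hidx, hxeq⟩ := List.mem_iff_getElem.mp hx
    have hlen : idx < j + 1 - (j + 1 - 10) ∧ (j + 1 - 10) + idx < lines.length := by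
      simp [List.length_take, List.length_drop] at hidx
      omega
    have hget : x = lines[(j + 1 - 10) + idx]'hlen.2 := by
      rw [← hxeq]
      rw [List.getElem_take, List.getElem_drop]
    refine ⟨(j + 1 - 10) + idx, by simp [List.mem_range]; omega, ?_⟩
    simp only [Bool.and_eq_true, decide_eq_true_eq]
    refine ⟨by omega, ?_⟩
    rw [pvPkg, List.getD_eq_getElem lines "" hlen.2, ← hget]
    exact hp
  · rintro ⟨jj, hjj, hcond⟩
    rw [List.mem_range] at hjj
    rw [Bool.and_eq_true, decide_eq_true_eq] at hcond
    obtain ⟨hle, hp⟩ := hcond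
    have hjlen : jj < lines.length := by
      by_contra hge
      rw [pvPkg, List.getD_eq_default lines "" (by omega)] at hp
      exact absurd hp (by decide)
    rw [pvPkg, List.getD_eq_getElem lines "" hjlen] at hp
    refine ⟨lines[jj], ?_, hp⟩
    have hidx : jj - (j + 1 - 10) <
        min (j + 1 - (j + 1 - 10)) (List.drop (j + 1 - 10) lines).length := by
      simp [List.length_drop]
      omega
    have : (List.take (j + 1 - (j + 1 - 10)) (List.drop (j + 1 - 10) lines))[jj - (j + 1 - 10)]'(by
        simpa [List.length_take] using hidx) = lines[jj] := by
      rw [List.getElem_take, List.getElem_drop]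
      congr 1
      omega
    rw [← this]
    exact List.getElem_mem _

-- A's joined context window tests exactly pvWin
theorem pv_winA (lines : List String) (j : Nat) :
    PySem.Str.isIn "pkginfo"
      (PySem.Str.join "\n"
        (PySem.List.slice lines (some (max 0 ((j : Nat) + 1 - 10))) (some ((j : Nat) + 1)))) =
      pvWin lines j := by
  have hmax : (max 0 ((j : Int) + 1 - 10)) = ((j + 1 - 10 : Nat) : Int) := by omega
  have hb : ((j : Int) + 1) = ((j + 1 : Nat) : Int) := by omega
  rw [hmax, hb, PySem.List.slice_natCast]
  rw [PySem.Str.isIn_eq, PySem.Str.toList_join]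
  rw [show ("\n".toList : List Char) = ['\n'] from rfl]
  rw [pv_isIn_join_any _ '\n' (by decide) (by decide)]
  rw [List.any_map]
  rw [← pv_anyWindow lines j]
  simp only [PySem.Str.isIn_eq]
  congr 1

-- A's helper computes pvFind
theorem pv_findA (lines : List String) (k : String) :
    find_yaml_key_line_number k lines = pvFind lines k := by
  unfold find_yaml_key_line_number pvFind
  rw [show (1 : Int) = 0 + 1 from by norm_num, pv_enumerate_shift]
  rw [PySem.List.enumerate_eq_map_pyRange lines ""]
  rw [show PySem.List.len lines = ((lines.length : Nat) : Int) from rfl]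
  rw [PySem.List.pyRange_zero_natCast]
  rw [List.map_map, List.map_map, List.find?_map]
  rw [pv_find?_congr_mem _ _ (pvHit lines k) ?_]
  · cases hf : (List.range lines.length).find? (pvHit lines k) <;> simp
  · intro j hj
    simp only [Function.comp]
    rw [PySem.List.pyGetD_natCast]
    rw [pv_winA lines j]
    rfl

theorem pv_find_ne_zero (lines : List String) (k : String) (n : Int)
    (h : pvFind lines k = some n) : n ≠ 0 := by
  unfold pvFind at h
  cases hf : (List.range lines.length).find? (pvHit lines k) with
  | none => rw [hf] at h; simp at h
  | some a => rw [hf] at h; simp at h; omega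

-- inner loop of B: record k at v if unseen and matching
theorem pv_innerFold (lines : List String) (i : Nat) (v : Int)
    (empty : List String) (loc : PySem.Dict String Int) (k' : String) :
    (empty.foldl (fun loc k =>
        if !loc.contains k && pvKey lines k i then loc.insert k v else loc) loc).get? k' =
      if k' ∈ empty ∧ loc.get? k' = none ∧ pvKey lines k' i then some v else loc.get? k' := by
  induction empty generalizing loc with
  | nil => simp
  | cons k0 ks ih =>
    simp only [List.foldl_cons]
    rw [ih]
    have hstep : (if !loc.contains k0 && pvKey lines k0 i then loc.insert k0 v else loc).get? k' =
        if k' = k0 ∧ loc.get? k' = none ∧ pvKey lines k0 i then some v else loc.get? k' := by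
      have hc := PySem.Dict.contains_eq_isSome_get? loc k0
      by_cases c1 : loc.contains k0 <;> by_cases c2 : pvKey lines k0 i <;>
        by_cases c3 : k' = k0 <;>
        simp_all [PySem.Dict.get?_insert, Option.isSome_iff_ne_none]
    rw [hstep]
    by_cases h1 : k' = k0
    · subst h1
      by_cases h2 : k' ∈ ks <;> by_cases h3 : loc.get? k' = none <;>
        by_cases h4 : pvKey lines k' i <;> simp [*]
    · by_cases h2 : k' ∈ ks <;> by_cases h3 : loc.get? k' = none <;>
        by_cases h4 : pvKey lines k' i <;> simp [*]

theorem pv_last_succ (lines : List String) (m : Nat) :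
    pvLast lines (m + 1) =
      if pvPkg lines m then some (m : Int) else pvLast lines m := by
  unfold pvLast
  rw [List.range_succ, List.foldl_append]
  simp

theorem pv_last_spec (lines : List String) (m : Nat) :
    (pvLast lines m = none → ∀ j, j < m → pvPkg lines j = false) ∧
      (∀ jz : Int, pvLast lines m = some jz →
        ∃ jn : Nat, jz = (jn : Int) ∧ jn < m ∧ pvPkg lines jn = true ∧
          ∀ j', jn < j' → j' < m → pvPkg lines j' = false) := by
  induction m with
  | zero => exact ⟨fun _ j hj => by omega, fun jz hz => by simp [pvLast] at hz⟩
  | succ m ih =>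
    rw [pv_last_succ]
    by_cases pm : pvPkg lines m
    · refine ⟨fun h => by simp [pm] at h, fun jz hz => ?_⟩
      simp [pm] at hz
      exact ⟨m, hz.symm, by omega, pm, fun j' h1 h2 => by omega⟩
    · simp only [pm]
      refine ⟨fun h j hj => ?_, fun jz hz => ?_⟩
      · rcases Nat.lt_succ_iff_lt_or_eq.mp hj with h' | rfl
        · exact ih.1 h j h'
        · simpa using pm
      · obtain ⟨jn, rfl, hlt, hpkg, hmax⟩ := ih.2 jz hz
        refine ⟨jn, rfl, by omega, hpkg, fun j' h1 h2 => ?_⟩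
        rcases Nat.lt_succ_iff_lt_or_eq.mp h2 with h' | rfl
        · exact hmax j' h1 h'
        · simpa using pm

-- the tracked last-'pkginfo' index decides the window test
theorem pv_lastWin (lines : List String) (i : Nat) :
    (match pvLast lines (i + 1) with
      | some j => decide ((i : Int) - j ≤ 9)
      | none => false) = pvWin lines i := by
  cases h : pvLast lines (i + 1) with
  | none =>
    have hnone := (pv_last_spec lines (i + 1)).1 h
    symm
    rw [pvWin, List.any_eq_false]
    intro j hj
    rw [List.mem_range] at hj
    simp [hnone j hj]
  | some jz =>
    obtain ⟨jn, rfl, hlt, hpkg, hmax⟩ := (pv_last_spec lines (i + 1)).2 jz h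
    simp only [pvWin]
    rw [Bool.eq_iff_iff]
    simp only [decide_eq_true_eq, List.any_eq_true, List.mem_range, Bool.and_eq_true]
    constructor
    · intro hle
      exact ⟨jn, hlt, by omega, hpkg⟩
    · rintro ⟨j, hj, hij, hp⟩
      by_cases hjn : j ≤ jn
      · omega
      · rw [hmax j (by omega) hj] at hp
        exact absurd hp (by simp)

-- the state invariant of B's single pass
theorem pv_stateSpec (lines : List String) (empty : List String) (m : Nat) :
    (pvState lines empty m).1 = pvLast lines m ∧
      ∀ k, (pvState lines empty m).2.get? k =
        if k ∈ empty then ((List.range m).find? (pvHit lines k)).map (fun i => (i : Int) + 1)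
        else none := by
  induction m with
  | zero =>
    refine ⟨rfl, fun k => ?_⟩
    simp [pvState, PySem.Dict.get?_empty]
  | succ m ih =>
    have hstate : pvState lines empty (m + 1) = pvStep lines empty (pvState lines empty m) m := by
      unfold pvState
      rw [List.range_succ, List.foldl_append]
      simp
    rw [hstate]
    unfold pvStep
    rw [ih.1, ← pv_last_succ]
    refine ⟨rfl, fun k => ?_⟩
    have hsplit : (List.range (m + 1)).find? (pvHit lines k) =
        ((List.range m).find? (pvHit lines k)).or
          (if pvHit lines k m then some m else none) := by
      rw [List.range_succ, List.find?_append]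
      cases h : pvHit lines k m <;> simp [List.find?, h]
    cases hl : pvLast lines (m + 1) with
    | none =>
      have hw : pvWin lines m = false := by rw [← pv_lastWin lines m, hl]
      have hhit : pvHit lines k m = false := by simp [pvHit, hw]
      simp only []
      rw [ih.2 k, hsplit, hhit]
      simp
    | some j =>
      have hd : decide ((m : Int) - j ≤ 9) = pvWin lines m := by rw [← pv_lastWin lines m, hl]
      by_cases hij : (m : Int) - j ≤ 9
      · have hw : pvWin lines m = true := by rw [← hd]; simp [hij]
        simp only [if_pos hij]
        rw [pv_innerFold, ih.2 k, hsplit]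
        by_cases hmem : k ∈ empty
        · simp only [hmem, if_pos, true_and]
          cases hfm : (List.range m).find? (pvHit lines k) with
          | some i0 => simp [pvHit]
          | none =>
            simp only [Option.none_or]
            by_cases hkey : pvKey lines k m <;> simp [pvHit, hkey, hw]
        · simp [hmem]
      · have hw : pvWin lines m = false := by rw [← hd]; simp [hij]
        have hhit : pvHit lines k m = false := by simp [pvHit, hw]
        simp only [if_neg hij]
        rw [ih.2 k, hsplit, hhit]
        simp

theorem pv_A_fold (lines : List String) (pkginfo : List (String × Option String))
    (acc : List (String × Int)) :
    pkginfo.foldl (fun empty_keys kv =>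
      let is_empty : Bool :=
        match kv.2 with
        | none => true
        | some s => PySem.Str.strip s == ""
      if is_empty then
        match find_yaml_key_line_number kv.1 lines with
        | some line_num =>
          if line_num != 0 then empty_keys ++ [(kv.1, line_num)] else empty_keys
        | none => empty_keys
      else empty_keys) acc =
      acc ++ pkginfo.filterMap (fun kv =>
        if pvEmpty kv.2 then (pvFind lines kv.1).map (fun n => (kv.1, n)) else none) := by
  induction pkginfo generalizing acc with
  | nil => simp
  | cons kv rest ih =>
    rw [List.foldl_cons, ih, List.filterMap_cons]
    have hm : (match kv.2 with
        | none => true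
        | some s => PySem.Str.strip s == "") = pvEmpty kv.2 := rfl
    by_cases he : pvEmpty kv.2
    · simp only [hm, he, if_pos, pv_findA]
      cases hfind : pvFind lines kv.1 with
      | none => simp
      | some n =>
        have hne := pv_find_ne_zero lines kv.1 n hfind
        simp [bne_iff_ne, hne]
    · simp [hm, he]

theorem pv_A_eq (pkginfo : List (String × Option String)) (lines : List String) :
    check_empty_keys_py pkginfo lines =
      pkginfo.filterMap (fun kv =>
        if pvEmpty kv.2 then (pvFind lines kv.1).map (fun n => (kv.1, n)) else none) := by
  rw [check_empty_keys_py, pv_A_fold, List.nil_append]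

theorem pv_B_eq (pkginfo : List (String × Option String)) (lines : List String) :
    check_empty_keys_py_alt pkginfo lines =
      pkginfo.filterMap (fun kv =>
        if pvEmpty kv.2 then (pvFind lines kv.1).map (fun n => (kv.1, n)) else none) := by
  rw [check_empty_keys_py_alt]
  have hempty : (pkginfo.filterMap (fun kv =>
      match kv.2 with
      | none => some kv.1
      | some s => if PySem.Str.strip s == "" then some kv.1 else none)) =
      pkginfo.filterMap (fun kv => if pvEmpty kv.2 then some kv.1 else none) := by
    apply List.filterMap_congr
    intro kv _
    cases kv.2 <;> rfl
  rw [hempty]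
  set empty := pkginfo.filterMap (fun kv => if pvEmpty kv.2 then some kv.1 else none) with hemp
  have hfold : (PySem.List.enumerate lines 0).foldl (fun st p =>
      let lastPkg : Option Int := if PySem.Str.isIn "pkginfo" p.2 then some p.1 else st.1
      let loc : PySem.Dict String Int :=
        match lastPkg with
        | some j =>
          if p.1 - j ≤ 9 then
            empty.foldl (fun loc k =>
              if !loc.contains k && PySem.Str.isIn (k ++ ":") p.2 then
                loc.insert k (p.1 + 1)
              else loc) st.2
          else st.2
        | none => st.2
      (lastPkg, loc)) (none, PySem.Dict.empty) = pvState lines empty lines.length := by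
    rw [PySem.List.enumerate_eq_map_pyRange lines ""]
    rw [show PySem.List.len lines = ((lines.length : Nat) : Int) from rfl]
    rw [PySem.List.pyRange_zero_natCast, List.map_map, List.foldl_map]
    rw [pvState]
    congr 1
    funext st k
    simp only [Function.comp, PySem.List.pyGetD_natCast, pvStep, pvPkg, pvKey]
    rfl
  rw [hfold]
  apply Eq.trans (b := empty.filterMap (fun k => (pvFind lines k).map (fun n => (k, n))))
  · apply List.filterMap_congr
    intro k hk
    rw [(pv_stateSpec lines empty lines.length).2 k, if_pos hk]
    rfl
  · rw [hemp, List.filterMap_filterMap]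
    apply List.filterMap_congr
    intro kv _
    by_cases he : pvEmpty kv.2 <;> simp [he]

-- ===== VERDICT (by name: the statement is the Claim_ definition above) =====
theorem check_empty_keys_py_spec : Claim_equal_check_empty_keys_py := by
  intro pkginfo lines _
  unfold Spec_check_empty_keys_py
  rw [pv_A_eq, pv_B_eq]
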